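-- pv_equiv track=rewrite | github.com/YassineCH-7777/pfe2025 | backend/server.py | is_valid_layout
-- ===== SOURCE A (Python) =====
-- def is_valid_layout(layout, pieces, panel_width, panel_height):
--     used_pieces = {}
--     for piece in pieces:
--         piece_id = f"{piece['width']}_{piece['height']}"
--         used_pieces[piece_id] = used_pieces.get(piece_id, 0) + piece.get("quantity", 1)
--
--     for item in layout:
--         if item["x"] + item["width"] > panel_width or item["y"] + item["height"] > panel_height:
--             return False
--         piece_id = f"{item['width']}_{item['height']}"
--         if piece_id not in used_pieces or used_pieces[piece_id] <= 0:
--             return False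
--         used_pieces[piece_id] -= 1
--
--     return all(count == 0 for count in used_pieces.values())
-- ===== SOURCE B (Python) =====
-- def is_valid_layout(layout, pieces, panel_width, panel_height):
--     inv = {}
--     for piece in pieces:
--         pid = f"{piece['width']}_{piece['height']}"
--         inv[pid] = inv.get(pid, 0) + piece.get("quantity", 1)
--     for item in layout:
--         if item["x"] + item["width"] > panel_width or item["y"] + item["height"] > panel_height:
--             return False
--     ids = [f"{item['width']}_{item['height']}" for item in layout]
--     lay = {}
--     for pid in ids:
--         lay[pid] = lay.get(pid, 0) + 1
--     return all(inv.get(pid, 0) == lay.get(pid, 0) for pid in inv.keys() | lay.keys())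
-- ===== Notes on version B (the rewrite author's own statement) =====
-- stated objective: alternative
-- what changed: A interleaves bounds checking with destructive decrement of a mutable inventory dict and three early exits; B does a pure bounds pass, then builds a separate layout-count dict and compares it with the inventory dict via get(id,0) over the union of keys.
-- outside the precondition, e.g. on is_valid_layout([{'x': 0, 'y': 0, 'width': 5, 'height': 5}, {}], [], 10, 10): A returns False, B raises KeyError
import Mathlib
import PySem

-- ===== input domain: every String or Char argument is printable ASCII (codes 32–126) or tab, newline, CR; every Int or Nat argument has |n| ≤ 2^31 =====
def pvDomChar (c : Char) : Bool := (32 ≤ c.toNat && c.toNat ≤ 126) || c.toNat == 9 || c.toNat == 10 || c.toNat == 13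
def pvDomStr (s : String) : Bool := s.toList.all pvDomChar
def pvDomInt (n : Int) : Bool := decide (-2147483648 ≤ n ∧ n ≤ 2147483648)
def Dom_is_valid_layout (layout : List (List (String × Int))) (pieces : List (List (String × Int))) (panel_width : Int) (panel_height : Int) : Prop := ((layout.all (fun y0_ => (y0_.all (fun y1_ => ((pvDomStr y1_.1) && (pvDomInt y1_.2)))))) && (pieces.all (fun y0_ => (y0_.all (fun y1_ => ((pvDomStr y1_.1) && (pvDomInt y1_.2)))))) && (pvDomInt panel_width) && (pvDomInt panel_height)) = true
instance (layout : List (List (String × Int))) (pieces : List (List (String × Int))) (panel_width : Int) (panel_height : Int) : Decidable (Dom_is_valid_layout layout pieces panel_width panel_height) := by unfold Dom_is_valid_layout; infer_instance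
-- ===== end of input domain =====

-- B replaces A's interleaved bounds-check/decrement loop over a mutable inventory by a pure
-- bounds pass plus two count dicts compared over the union of their keys (alternative decomposition, same cost).


-- ===== PORT A =====
-- f"{d['width']}_{d['height']}" (keys exist under Pre_; getD 0 stands in for d[k] there)
def pvId (d : List (String × Int)) : String :=
  PySem.Int.toStr ((PySem.Dict.mk d).getD "width" 0) ++ "_" ++ PySem.Int.toStr ((PySem.Dict.mk d).getD "height" 0)

-- the first loop of BOTH Pythons verbatim: used_pieces/inv[pid] = .get(pid,0) + piece.get('quantity',1)
def pvInv (pieces : List (List (String × Int))) : PySem.Dict String Int :=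
  pieces.foldl (fun d piece =>
    d.insert (pvId piece) (d.getD (pvId piece) 0 + (PySem.Dict.mk piece).getD "quantity" 1))
    PySem.Dict.empty

-- A's second loop: early-return False on bounds or missing/exhausted count, else decrement and recurse
def pvALoop (panel_width panel_height : Int) (used : PySem.Dict String Int) :
    List (List (String × Int)) → Bool
  | [] => used.values.all (fun count => count == 0)
  | item :: rest =>
    if (PySem.Dict.mk item).getD "x" 0 + (PySem.Dict.mk item).getD "width" 0 > panel_width ||
        (PySem.Dict.mk item).getD "y" 0 + (PySem.Dict.mk item).getD "height" 0 > panel_height then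
      false
    else
      if !used.contains (pvId item) || used.getD (pvId item) 0 ≤ 0 then false
      else pvALoop panel_width panel_height (used.insert (pvId item) (used.getD (pvId item) 0 - 1)) rest

def is_valid_layout (layout : List (List (String × Int))) (pieces : List (List (String × Int))) (panel_width : Int) (panel_height : Int) : Bool :=
  pvALoop panel_width panel_height (pvInv pieces) layout

-- ===== PORT B =====
def pvInBounds (panel_width panel_height : Int) (item : List (String × Int)) : Bool :=
  !((PySem.Dict.mk item).getD "x" 0 + (PySem.Dict.mk item).getD "width" 0 > panel_width ||
    (PySem.Dict.mk item).getD "y" 0 + (PySem.Dict.mk item).getD "height" 0 > panel_height)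

-- lay[pid] = lay.get(pid,0) + 1 over the id list
def pvLay (ids : List String) : PySem.Dict String Int :=
  ids.foldl (fun d pid => d.insert pid (d.getD pid 0 + 1)) PySem.Dict.empty

def is_valid_layout_alt (layout : List (List (String × Int))) (pieces : List (List (String × Int))) (panel_width : Int) (panel_height : Int) : Bool :=
  let inv := pvInv pieces
  if layout.all (pvInBounds panel_width panel_height) then
    let lay := pvLay (layout.map pvId)
    (PySem.Set.union inv.keys lay.keys).all (fun pid => inv.getD pid 0 == lay.getD pid 0)
  else false

-- ===== PRECONDITION & SPEC =====
-- Pre_ excludes inputs where a key the Pythons would read is missing: there Python A either raises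
-- KeyError or (having already returned False at an earlier item) never reaches the malformed item,
-- while B's separate bounds pass may reach it and raise KeyError ("y"/"height" are only read when
-- x+width ≤ panel_width, mirroring the short-circuit of `or` in both Pythons).
def Pre_is_valid_layout (layout : List (List (String × Int))) (pieces : List (List (String × Int))) (panel_width : Int) (panel_height : Int) : Prop :=
  (∀ item ∈ layout, (PySem.Dict.mk item).contains "x" ∧ (PySem.Dict.mk item).contains "width" ∧
      (¬((PySem.Dict.mk item).getD "x" 0 + (PySem.Dict.mk item).getD "width" 0 > panel_width) →
        (PySem.Dict.mk item).contains "y" ∧ (PySem.Dict.mk item).contains "height")) ∧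
  (∀ piece ∈ pieces, (PySem.Dict.mk piece).contains "width" ∧ (PySem.Dict.mk piece).contains "height")
instance (layout : List (List (String × Int))) (pieces : List (List (String × Int))) (panel_width : Int) (panel_height : Int) : Decidable (Pre_is_valid_layout layout pieces panel_width panel_height) := by unfold Pre_is_valid_layout; infer_instance

def pvWitness_is_valid_layout : (List (List (String × Int))) × (List (List (String × Int))) × Int × Int :=
  ([[("x", 0), ("y", 0), ("width", 2), ("height", 3)]], [[("width", 2), ("height", 3)]], 5, 5)

def Spec_is_valid_layout (layout : List (List (String × Int))) (pieces : List (List (String × Int))) (panel_width : Int) (panel_height : Int) (out : Bool) : Prop := out = is_valid_layout_alt layout pieces panel_width panel_height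
instance (layout : List (List (String × Int))) (pieces : List (List (String × Int))) (panel_width : Int) (panel_height : Int) (out : Bool) : Decidable (Spec_is_valid_layout layout pieces panel_width panel_height out) := by unfold Spec_is_valid_layout; infer_instance

-- ===== CLAIM (what is proved, stated in full; the proofs are below) =====
def Claim_equal_is_valid_layout : Prop := ∀ (layout : List (List (String × Int))) (pieces : List (List (String × Int))) (panel_width : Int) (panel_height : Int), Dom_is_valid_layout layout pieces panel_width panel_height → Pre_is_valid_layout layout pieces panel_width panel_height → Spec_is_valid_layout layout pieces panel_width panel_height (is_valid_layout layout pieces panel_width panel_height)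

-- ===== LEMMAS AND PROOFS =====

theorem pvInv_keys_nodup (pieces : List (List (String × Int))) : (pvInv pieces).keys.Nodup := by
  exact PySem.Dict.nodup_keys_foldl_insert_key pieces pvId _ _ PySem.Dict.nodup_keys_empty

theorem pvLay_getD (ids : List String) (pid : String) :
    (pvLay ids).getD pid 0 = (ids.count pid : Int) := by
  simpa [pvLay] using PySem.Dict.getD_foldl_insert_add_one ids PySem.Dict.empty pid

theorem pvLay_keys (ids : List String) : (pvLay ids).keys = PySem.Set.ofList ids := by
  have h := PySem.Dict.keys_foldl_insert ids (fun (d : PySem.Dict String Int) x => d.getD x 0 + 1) PySem.Dict.empty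
  simpa [pvLay, PySem.Dict.keys_empty, PySem.Set.update_nil_left] using h

-- characterization of A's layout loop
theorem pvALoop_iff (panel_width panel_height : Int) :
    ∀ (rest : List (List (String × Int))) (used : PySem.Dict String Int), used.keys.Nodup →
      (pvALoop panel_width panel_height used rest = true ↔
        ((∀ it ∈ rest, pvInBounds panel_width panel_height it = true) ∧
         ∀ pid : String, ((rest.map pvId).count pid : Int) = used.getD pid 0)) := by
  intro rest
  induction rest with
  | nil =>
    intro used hnd
    simp only [pvALoop, List.not_mem_nil, false_implies, implies_true, true_and,
      List.map_nil, List.count_nil, Int.natCast_zero]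
    rw [List.all_eq_true]
    constructor
    · intro h pid
      by_cases hc : used.contains pid = true
      · rw [PySem.Dict.contains_eq_decide_mem_keys, decide_eq_true_iff] at hc
        have hv : used.getD pid 0 ∈ used.values := by
          rw [PySem.Dict.values_eq_map_keys used hnd 0]
          exact List.mem_map.mpr ⟨pid, hc, rfl⟩
        have h2 := h _ hv
        rw [beq_iff_eq] at h2
        omega
      · exact (PySem.Dict.getD_of_not_contains _ _ (by simpa using hc)).symm
    · intro h v hv
      rw [PySem.Dict.values_eq_map_keys used hnd 0] at hv
      obtain ⟨k, _, rfl⟩ := List.mem_map.mp hv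
      rw [beq_iff_eq]
      exact (h k).symm
  | cons item rest ih =>
    intro used hnd
    simp only [pvALoop]
    by_cases hb : ((PySem.Dict.mk item).getD "x" 0 + (PySem.Dict.mk item).getD "width" 0 > panel_width ||
        (PySem.Dict.mk item).getD "y" 0 + (PySem.Dict.mk item).getD "height" 0 > panel_height) = true
    · rw [if_pos hb]
      simp only [Bool.false_eq_true, false_iff, not_and]
      intro hall _
      have hthis := hall item (List.mem_cons_self ..)
      simp only [pvInBounds, hb, Bool.not_true] at hthis
      exact Bool.false_ne_true hthis
    · rw [if_neg hb]
      have hb' : ((PySem.Dict.mk item).getD "x" 0 + (PySem.Dict.mk item).getD "width" 0 > panel_width ||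
          (PySem.Dict.mk item).getD "y" 0 + (PySem.Dict.mk item).getD "height" 0 > panel_height) = false := by
        revert hb
        cases ((PySem.Dict.mk item).getD "x" 0 + (PySem.Dict.mk item).getD "width" 0 > panel_width ||
          (PySem.Dict.mk item).getD "y" 0 + (PySem.Dict.mk item).getD "height" 0 > panel_height) <;> simp
      have hbok : pvInBounds panel_width panel_height item = true := by
        simp [pvInBounds, hb']
      by_cases hfail : (!used.contains (pvId item) || used.getD (pvId item) 0 ≤ 0) = true
      · rw [if_pos hfail]
        simp only [Bool.false_eq_true, false_iff, not_and]
        intro _ h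
        have hcnt := h (pvId item)
        have hge : (1 : Int) ≤ (((item :: rest).map pvId).count (pvId item) : Int) := by
          have hp : 1 ≤ ((item :: rest).map pvId).count (pvId item) := by
            apply List.count_pos_iff.mpr
            exact List.mem_map.mpr ⟨item, List.mem_cons_self .., rfl⟩
          exact_mod_cast hp
        rw [hcnt] at hge
        rcases Bool.or_eq_true_iff.mp hfail with hnc | hle
        · rw [Bool.not_eq_true'] at hnc
          rw [PySem.Dict.getD_of_not_contains _ _ hnc] at hge
          omega
        · have hle' : used.getD (pvId item) 0 ≤ 0 := of_decide_eq_true hle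
          omega
      · rw [if_neg hfail]
        have hpos : 0 < used.getD (pvId item) 0 := by
          simp only [Bool.or_eq_true, not_or, Bool.not_eq_true', Bool.not_eq_false,
            decide_eq_true_eq, not_le] at hfail
          exact hfail.2
        rw [ih _ (PySem.Dict.nodup_keys_insert _ _ _ hnd)]
        constructor
        · rintro ⟨hbnd, hcnt⟩
          refine ⟨fun it hit => ?_, fun pid => ?_⟩
          · rcases List.mem_cons.mp hit with rfl | hm
            · exact hbok
            · exact hbnd it hm
          · have hc := hcnt pid
            rw [PySem.Dict.getD_insert] at hc
            by_cases hpid : pid = pvId item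
            · subst hpid
              rw [if_pos rfl] at hc
              simp only [List.map_cons, List.count_cons_self]
              push_cast
              omega
            · rw [if_neg hpid] at hc
              rw [List.map_cons, List.count_cons_of_ne (Ne.symm hpid)]
              exact hc
        · rintro ⟨hbnd, hcnt⟩
          refine ⟨fun it hit => hbnd it (List.mem_cons_of_mem _ hit), fun pid => ?_⟩
          have hc := hcnt pid
          rw [PySem.Dict.getD_insert]
          by_cases hpid : pid = pvId item
          · subst hpid
            rw [List.map_cons, List.count_cons_self] at hc
            rw [if_pos rfl]
            push_cast at hc ⊢
            omega
          · rw [if_neg hpid]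
            rw [List.map_cons, List.count_cons_of_ne (Ne.symm hpid)] at hc
            exact hc

-- characterization of B
theorem alt_iff (layout pieces : List (List (String × Int))) (panel_width panel_height : Int) :
    (is_valid_layout_alt layout pieces panel_width panel_height = true ↔
      ((∀ it ∈ layout, pvInBounds panel_width panel_height it = true) ∧
       ∀ pid : String, ((layout.map pvId).count pid : Int) = (pvInv pieces).getD pid 0)) := by
  simp only [is_valid_layout_alt]
  by_cases hb : layout.all (pvInBounds panel_width panel_height) = true
  · rw [if_pos hb]
    rw [List.all_eq_true] at hb
    rw [List.all_eq_true]
    constructor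
    · intro h
      refine ⟨hb, fun pid => ?_⟩
      by_cases hm : pid ∈ PySem.Set.union (pvInv pieces).keys (pvLay (layout.map pvId)).keys
      · have h2 := h pid hm
        rw [beq_iff_eq, pvLay_getD] at h2
        omega
      · rw [PySem.Set.mem_union] at hm
        push_neg at hm
        have h1 : (pvInv pieces).getD pid 0 = 0 := by
          apply PySem.Dict.getD_of_not_contains
          rw [PySem.Dict.contains_eq_decide_mem_keys]
          exact decide_eq_false hm.1
        have h2 : pid ∉ layout.map pvId := by
          intro hcc
          exact hm.2 (by rw [pvLay_keys]; exact (PySem.Set.mem_ofList _ _).mpr hcc)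
        rw [h1, List.count_eq_zero_of_not_mem h2]
        rfl
    · rintro ⟨-, h⟩ pid _
      rw [beq_iff_eq, pvLay_getD]
      exact (h pid).symm
  · rw [if_neg hb]
    simp only [Bool.false_eq_true, false_iff, not_and]
    intro hall _
    exact hb (List.all_eq_true.mpr hall)

-- ===== VERDICT (by name: the statement is the Claim_ definition above) =====
theorem is_valid_layout_spec : Claim_equal_is_valid_layout := by
  intro layout pieces panel_width panel_height _ _
  unfold Spec_is_valid_layout
  have hA := pvALoop_iff panel_width panel_height layout (pvInv pieces) (pvInv_keys_nodup pieces)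
  have hB := alt_iff layout pieces panel_width panel_height
  rw [Bool.eq_iff_iff]
  unfold is_valid_layout
  rw [hA, hB]
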